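-- pv_equiv track=rewrite | github.com/vinjai/Algorithms_Coursera_Stanford2 | scripts/Problem2b.py | maskClustering
-- ===== SOURCE A (Python) =====
-- from itertools import combinations
--
-- class UnionFind(object):
--     """Implementation of Union Find Data Structure"""
--
--     def __init__(self, nodeList):
--         self._nodeLeaderList=dict()
--         self._leaderSets = dict()
--         self._nodeList=nodeList
--         self._nodeCount=len(nodeList)
--         for node in nodeList:
--             self._leaderSets.update({node:{node}})
--             self._nodeLeaderList.update({node:node})
--
--     def find(self, node):
--         """Return leader of given node"""
--         return self._nodeLeaderList[node]
--
--     def union(self, node1, node2):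
--         """Union of tree containing node1 and tree containing node2"""
--         leader1 = self.find(node1)
--         leader2 = self.find(node2)
--
--         if leader1==leader2:
--             return
--
--         tree1 = self._leaderSets[leader1]
--         tree2 = self._leaderSets[leader2]
--
--         if len(tree1)<len(tree2):
--             for node in tree1:
--                 self._nodeLeaderList[node]=leader2
--             self._leaderSets[leader2]=self._leaderSets[leader2].union(self._leaderSets[leader1])
--             del self._leaderSets[leader1]
--         else:
--             for node in tree2:
--                 self._nodeLeaderList[node]=leader1
--             self._leaderSets[leader1]=self._leaderSets[leader1].union(self._leaderSets[leader2])
--             del self._leaderSets[leader2]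
--
--     def uniqueLeaders(self):
--         return len(self._leaderSets)
--
-- def calculateMasks(bitCount, maxCombinations):
--     """Create swap masks in the form tuples with numbers indicating which bits to swap."""
--
--     masks = []
--     for i in range(1,maxCombinations):
--         masks=masks+[ c for c in combinations(range(bitCount), i) ]
--
--     return masks
--
-- def swapByMask(nodeLabel, mask):
--     """Swap bits in label according to a mask"""
--
--     modNodeLabel = [ c for c in nodeLabel ]
--
--     for bitNum in mask:
--         if modNodeLabel[bitNum] == '0':
--             modNodeLabel[bitNum] = '1'
--         elif modNodeLabel[bitNum] == '1':
--             modNodeLabel[bitNum] = '0'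
--
--     return "".join(modNodeLabel)
--
-- def generateIntegerLabels(nodeList):
--     """Returns Dictionary of labels for nodes"""
--     d = dict()
--     for node in nodeList:
--         d.update({node:int(node,2)})
--     return d
--
-- def maskClustering(nodeList, maxSpacing, bitCount):
--     """Return the number of clusters formed when maxSpacing is achieved"""
--
--     swapMasks = calculateMasks(bitCount,maxSpacing)
--     labels = generateIntegerLabels(nodeList)
--
--     UFObj = UnionFind([value for key, value in labels.items() ])
--
--     for node in nodeList:
--         currentLabel=labels[node]
--         for mask in swapMasks:
--             modNodeLabel = swapByMask(node,mask)
--             if modNodeLabel in labels: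
--                 UFObj.union(labels[modNodeLabel],currentLabel)
--
--     return UFObj.uniqueLeaders()
-- ===== SOURCE B (Python) =====
-- from itertools import combinations
--
-- def _flip(node, mask):
--     chars = [c for c in node]
--     for bitNum in mask:
--         if chars[bitNum] == '0':
--             chars[bitNum] = '1'
--         elif chars[bitNum] == '1':
--             chars[bitNum] = '0'
--     return "".join(chars)
--
-- def maskClustering(nodeList, maxSpacing, bitCount):
--     """Count clusters by merging partition blocks along Hamming-neighbour edges."""
--     masks = [c for i in range(1, maxSpacing) for c in combinations(range(bitCount), i)]
--     labels = {node: int(node, 2) for node in nodeList}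
--     edges = [(labels[_flip(node, m)], labels[node])
--              for node in nodeList for m in masks if _flip(node, m) in labels]
--     blocks = [[v] for v in dict.fromkeys(labels.values())]
--     for a, b in edges:
--         bb = next(blk for blk in blocks if b in blk)
--         if a not in bb:
--             ba = next(blk for blk in blocks if a in blk)
--             blocks.remove(ba)
--             blocks.remove(bb)
--             blocks.append(ba + bb)
--     return len(blocks)
-- ===== Notes on version B (the rewrite author's own statement) =====
-- stated objective: alternative
-- what changed: Replaces A's UnionFind class (per-node leader dict plus size-balanced merging of leader sets) by materialising the Hamming-neighbour edge list and maintaining a plain list of partition blocks, merged by membership lookup and concatenation; the cluster count is the number of surviving blocks.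
import Mathlib
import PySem

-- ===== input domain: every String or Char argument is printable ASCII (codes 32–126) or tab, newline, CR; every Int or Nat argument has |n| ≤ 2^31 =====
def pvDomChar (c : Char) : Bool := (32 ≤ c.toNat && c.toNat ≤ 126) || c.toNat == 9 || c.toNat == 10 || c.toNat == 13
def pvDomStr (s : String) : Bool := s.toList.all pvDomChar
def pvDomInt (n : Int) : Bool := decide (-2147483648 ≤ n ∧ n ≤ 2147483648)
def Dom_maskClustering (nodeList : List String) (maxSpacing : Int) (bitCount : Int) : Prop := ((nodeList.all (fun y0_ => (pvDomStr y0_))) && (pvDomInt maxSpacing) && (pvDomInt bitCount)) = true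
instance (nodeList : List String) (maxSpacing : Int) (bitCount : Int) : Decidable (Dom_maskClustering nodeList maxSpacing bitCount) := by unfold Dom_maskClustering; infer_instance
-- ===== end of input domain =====

-- B replaces A's UnionFind (leader map + size-balanced set merging) by a materialised
-- edge list and a plain list of partition blocks merged by lookup-and-concatenate
-- (objective: alternative; return value only, neither version mutates its arguments).

-- ===== PORT A =====

-- swapByMask(nodeLabel, mask): flip '0'/'1' chars at the mask positions
def swapByMask (nodeLabel : String) (mask : List Int) : String :=
  String.ofList (mask.foldl (fun cs bitNum =>
    if PySem.List.pyGetD cs bitNum ' ' = '0' then PySem.List.pySetD cs bitNum '1'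
    else if PySem.List.pyGetD cs bitNum ' ' = '1' then PySem.List.pySetD cs bitNum '0'
    else cs) nodeLabel.toList)

-- calculateMasks(bitCount, maxCombinations)
def calculateMasks (bitCount maxCombinations : Int) : List (List Int) :=
  (PySem.List.pyRange 1 maxCombinations 1).foldl
    (fun masks i => masks ++ PySem.List.combinations (PySem.List.pyRange 0 bitCount 1) i.toNat) []

-- generateIntegerLabels(nodeList); int(node, 2) total form (ValueError excluded by Pre_)
def generateIntegerLabels (nodeList : List String) : PySem.Dict String Int :=
  nodeList.foldl (fun d node => d.insert node ((PySem.Int.ofStrBase? node 2).getD 0)) PySem.Dict.empty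

-- UnionFind state: (_nodeLeaderList, _leaderSets)
abbrev UFSt : Type := PySem.Dict Int Int × PySem.Dict Int (PySem.Set Int)

-- UnionFind.__init__(nodeList)
def ufInit (vals : List Int) : UFSt :=
  vals.foldl (fun s node => (s.1.insert node node, s.2.insert node (PySem.Set.add PySem.Set.empty node)))
    (PySem.Dict.empty, PySem.Dict.empty)

-- UnionFind.union(node1, node2); dict lookups in total form (keys always present in A's run)
def ufUnion (s : UFSt) (node1 node2 : Int) : UFSt :=
  let leader1 := s.1.getD node1 0
  let leader2 := s.1.getD node2 0
  if leader1 = leader2 then s else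
  let tree1 := s.2.getD leader1 []
  let tree2 := s.2.getD leader2 []
  if tree1.length < tree2.length then
    (tree1.foldl (fun m node => m.insert node leader2) s.1,
     (s.2.insert leader2 (PySem.Set.union (s.2.getD leader2 []) (s.2.getD leader1 []))).erase leader1)
  else
    (tree2.foldl (fun m node => m.insert node leader1) s.1,
     (s.2.insert leader1 (PySem.Set.union (s.2.getD leader1 []) (s.2.getD leader2 []))).erase leader2)

def maskClustering (nodeList : List String) (maxSpacing : Int) (bitCount : Int) : Int :=
  let swapMasks := calculateMasks bitCount maxSpacing
  let labels := generateIntegerLabels nodeList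
  let UFObj := ufInit (labels.items.map (fun p => p.2))
  let final := nodeList.foldl (fun s node =>
    let currentLabel := labels.getD node 0
    swapMasks.foldl (fun s mask =>
      let modNodeLabel := swapByMask node mask
      if labels.contains modNodeLabel then ufUnion s (labels.getD modNodeLabel 0) currentLabel
      else s) s) UFObj
  (final.2.size : Int)

-- ===== PORT B =====

-- Source B's _flip(node, mask) is byte-identical to A's swapByMask; it is ported by the same
-- definition (swapByMask) rather than a duplicate copy.

-- merge step of B's partition loop: block of b, then (unless a is there) block of a, concatenate
def mergeB (P : List (List Int)) (a b : Int) : List (List Int) :=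
  match P.find? (fun blk => blk.contains b) with
  | none => P
  | some bb =>
    if a ∈ bb then P
    else
      match P.find? (fun blk => blk.contains a) with
      | none => P
      | some ba => ((P.erase ba).erase bb) ++ [ba ++ bb]

def maskClustering_alt (nodeList : List String) (maxSpacing : Int) (bitCount : Int) : Int :=
  let masks := (PySem.List.pyRange 1 maxSpacing 1).flatMap
    (fun i => PySem.List.combinations (PySem.List.pyRange 0 bitCount 1) i.toNat)
  let labels := nodeList.foldl (fun d node => d.insert node ((PySem.Int.ofStrBase? node 2).getD 0)) PySem.Dict.empty
  let edges := nodeList.flatMap (fun node =>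
    (masks.filter (fun m => labels.contains (swapByMask node m))).map
      (fun m => (labels.getD (swapByMask node m) 0, labels.getD node 0)))
  let blocks := (PySem.List.dedup labels.values).map (fun v => [v])
  ((edges.foldl (fun P e => mergeB P e.1 e.2) blocks).length : Int)

-- ===== PRECONDITION & SPEC =====
-- Pre_ excludes exactly the inputs on which A raises: a node on which int(node, 2) raises
-- ValueError, and — when masks exist (maxSpacing ≥ 2 and bitCount ≥ 1) — a node shorter than
-- bitCount, on which swapByMask raises IndexError.  Everywhere else A returns and B matches.
def Pre_maskClustering (nodeList : List String) (maxSpacing : Int) (bitCount : Int) : Prop :=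
  (∀ s ∈ nodeList, (PySem.Int.ofStrBase? s 2).isSome = true) ∧
  (2 ≤ maxSpacing → 1 ≤ bitCount → ∀ s ∈ nodeList, bitCount ≤ PySem.Str.len s)
instance (nodeList : List String) (maxSpacing : Int) (bitCount : Int) : Decidable (Pre_maskClustering nodeList maxSpacing bitCount) := by unfold Pre_maskClustering; infer_instance

def pvWitness_maskClustering : List String × Int × Int := (["0", "1"], 2, 1)

def Spec_maskClustering (nodeList : List String) (maxSpacing : Int) (bitCount : Int) (out : Int) : Prop := out = maskClustering_alt nodeList maxSpacing bitCount
instance (nodeList : List String) (maxSpacing : Int) (bitCount : Int) (out : Int) : Decidable (Spec_maskClustering nodeList maxSpacing bitCount out) := by unfold Spec_maskClustering; infer_instance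

-- ===== CLAIM (what is proved, stated in full; the proofs are below) =====
def Claim_equal_maskClustering : Prop := ∀ (nodeList : List String) (maxSpacing : Int) (bitCount : Int), Dom_maskClustering nodeList maxSpacing bitCount → Pre_maskClustering nodeList maxSpacing bitCount → Spec_maskClustering nodeList maxSpacing bitCount (maskClustering nodeList maxSpacing bitCount)

-- ===== LEMMAS AND PROOFS =====

-- ---- small Dict facts not in the PySem book (erase is items.filter) ----


theorem dget_erase {ν : Type} (d : PySem.Dict Int ν) (k k' : Int) :
    (d.erase k).get? k' = if k' = k then none else d.get? k' := by
  obtain ⟨items⟩ := d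
  simp only [PySem.Dict.erase, PySem.Dict.get?]
  induction items with
  | nil => simp
  | cons p t ih =>
    by_cases h1 : p.1 = k <;> by_cases h2 : p.1 = k' <;>
      simp_all [beq_iff_eq]

theorem dnodup_keys_erase {ν : Type} (d : PySem.Dict Int ν) (k : Int)
    (h : d.keys.Nodup) : (d.erase k).keys.Nodup := by
  obtain ⟨items⟩ := d
  simp only [PySem.Dict.erase, PySem.Dict.keys] at *
  exact h.sublist (List.Sublist.map _ (List.filter_sublist (l := items)))

theorem dsize_insert_of_contains {ν : Type} (d : PySem.Dict Int ν) (k : Int) (v : ν)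
    (h : d.contains k = true) : (d.insert k v).size = d.size := by
  simp [PySem.Dict.size, PySem.Dict.insert, h]

theorem dsize_erase_of_contains {ν : Type} (d : PySem.Dict Int ν) (k : Int)
    (hnd : d.keys.Nodup) (h : d.contains k = true) : (d.erase k).size = d.size - 1 := by
  obtain ⟨items⟩ := d
  simp only [PySem.Dict.erase, PySem.Dict.size, PySem.Dict.contains, PySem.Dict.keys] at *
  induction items with
  | nil => simp at h
  | cons p t ih =>
    simp only [List.map_cons, List.nodup_cons] at hnd
    by_cases h1 : p.1 = k
    · have hall : ∀ q ∈ t, (!q.1 == k) = true := by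
        intro q hq
        have h2 := hnd.1
        simp only [List.mem_map] at h2
        have : p.1 ≠ q.1 := fun he => h2 ⟨q, hq, he.symm⟩
        simp [h1 ▸ this.symm]
      simp [List.filter_cons, h1, List.filter_eq_self.mpr hall]
    · have h' : t.any (fun p => p.1 == k) = true := by
        simp only [List.any_cons] at h
        rcases Bool.or_eq_true_iff.mp h with h | h
        · exact absurd (by simpa using h) h1
        · exact h
      have ih' := ih hnd.2 h'
      have hlen : 1 ≤ (List.filter (fun p => !p.1 == k) t).length + 1 := by omega
      have hlen2 : 1 ≤ t.length := by
        rcases List.any_eq_true.mp h' with ⟨q, hq, _⟩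
        exact List.length_pos_of_mem hq
      simp only [List.filter_cons, show (!p.1 == k) = true by simp [h1], if_pos]
      simp only [List.length_cons]
      omega

theorem dcontains_iff_isSome {ν : Type} (d : PySem.Dict Int ν) (k : Int) :
    d.contains k = true ↔ (d.get? k).isSome = true := by
  rw [PySem.Dict.contains_eq_isSome_get?]

theorem get?_foldl_insert_fn {ν : Type} (f : Int → ν) :
    ∀ (t : List Int) (m : PySem.Dict Int ν) (y : Int),
    ((t.foldl (fun m x => m.insert x (f x)) m).get? y) =
      if y ∈ t then some (f y) else m.get? y := by
  intro t
  induction t with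
  | nil => simp
  | cons x t ih =>
    intro m y
    simp only [List.foldl_cons, ih, List.mem_cons]
    by_cases hy : y ∈ t
    · simp [hy]
    · by_cases hx : y = x <;> simp [hy, hx, PySem.Dict.get?_insert_self, PySem.Dict.get?_insert_of_ne]

-- ---- the invariant tying A's UnionFind state to B's block partition ----

structure UInv (V : List Int) (s : UFSt) (P : List (List Int)) : Prop where
  nd1 : s.1.keys.Nodup
  nd2 : s.2.keys.Nodup
  dom : ∀ x, (s.1.get? x).isSome = true ↔ x ∈ V
  fib : ∀ l tr, s.2.get? l = some tr → (∀ x, x ∈ tr ↔ s.1.get? x = some l)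
  ldr : ∀ x l, s.1.get? x = some l → (s.2.get? l).isSome = true
  siz : s.2.size = P.length
  nonempty : ∀ blk ∈ P, blk ≠ []
  disj : P.Pairwise (fun b1 b2 => ∀ x ∈ b1, x ∉ b2)
  cover : ∀ x l, s.1.get? x = some l → ∃ blk ∈ P, x ∈ blk
  blockfib : ∀ blk ∈ P, ∀ x ∈ blk, ∀ y, (y ∈ blk ↔ s.1.get? y = s.1.get? x)

theorem inv_init (vals : List Int) :
    UInv (PySem.List.dedup vals) (ufInit vals) ((PySem.List.dedup vals).map (fun v => [v])) := by
  have hsplit : ufInit vals =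
      (vals.foldl (fun m x => m.insert x ((fun y => y) x)) PySem.Dict.empty,
       vals.foldl (fun m x => m.insert x ((fun y => [y]) x)) PySem.Dict.empty) := by
    unfold ufInit
    rw [PySem.List.foldl_prod_mk (f := fun (m : PySem.Dict Int Int) x => m.insert x x)
      (g := fun (m : PySem.Dict Int (PySem.Set Int)) x => m.insert x (PySem.Set.add PySem.Set.empty x))]
    rfl
  have h1 : ∀ y, (ufInit vals).1.get? y = if y ∈ vals then some y else none := by
    intro y; rw [hsplit]; simpa using get?_foldl_insert_fn (fun y => y) vals PySem.Dict.empty y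
  have h2 : ∀ y, (ufInit vals).2.get? y = if y ∈ vals then some [y] else none := by
    intro y; rw [hsplit]; simpa using get?_foldl_insert_fn (fun y => [y]) vals PySem.Dict.empty y
  have hk2 : (ufInit vals).2.keys = PySem.List.dedup vals := by
    rw [hsplit]
    rw [PySem.Dict.keys_foldl_insert (f := fun m x => (fun y => [y]) x)]
    simp [PySem.Set.update_nil_left]
  have hnd1 : (ufInit vals).1.keys.Nodup := by
    rw [hsplit]; exact PySem.Dict.nodup_keys_foldl_insert _ _ _ (by simp [PySem.Dict.nodup_keys_empty])
  have hnd2 : (ufInit vals).2.keys.Nodup := by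
    rw [hsplit]; exact PySem.Dict.nodup_keys_foldl_insert _ _ _ (by simp [PySem.Dict.nodup_keys_empty])
  refine ⟨hnd1, hnd2, ?_, ?_, ?_, ?_, ?_, ?_, ?_, ?_⟩
  · intro x; rw [h1]; split_ifs with h <;> simp [h, PySem.List.mem_dedup]
  · intro l tr htr x
    rw [h2] at htr
    split_ifs at htr with hl
    · obtain rfl : tr = [l] := by injection htr with h; exact h.symm
      rw [h1]
      constructor
      · intro hm
        simp only [List.mem_singleton] at hm; subst hm
        simp [hl]
      · intro hx; split_ifs at hx with h
        simp only [Option.some_inj] at hx; simp [hx]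
  · intro x l hx
    rw [h1] at hx; split_ifs at hx with h
    have hlx : x = l := by injection hx
    subst hlx
    rw [h2]; simp [h]
  · have : (ufInit vals).2.size = (ufInit vals).2.keys.length := by
      simp [PySem.Dict.size, PySem.Dict.keys]
    rw [this, hk2, List.length_map]
  · intro blk hblk; simp only [List.mem_map] at hblk; obtain ⟨v, _, rfl⟩ := hblk; simp
  · refine List.Pairwise.map _ ?_ (PySem.List.nodup_dedup vals)
    intro a b hne x hx hx'
    simp only [List.mem_singleton] at hx hx'
    exact hne (hx ▸ hx')
  · intro x l hx
    rw [h1] at hx; split_ifs at hx with h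
    exact ⟨[x], List.mem_map.mpr ⟨x, (PySem.List.mem_dedup _ _).mpr h, rfl⟩, by simp⟩
  · intro blk hblk x hxblk y
    simp only [List.mem_map] at hblk; obtain ⟨v, hv, rfl⟩ := hblk
    simp only [List.mem_singleton] at hxblk; subst hxblk
    have hvv : x ∈ vals := (PySem.List.mem_dedup _ _).mp hv
    rw [h1, h1]
    constructor
    · rintro h; simp only [List.mem_singleton] at h; subst h; rfl
    · intro h
      simp only [if_pos hvv] at h
      split_ifs at h with h'
      simp only [Option.some_inj] at h; simp [h]

theorem merged_inv (V : List Int) (s : UFSt) (P : List (List Int)) (hI : UInv V s P)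
    (src dst : Int) (tsrc tdst : List Int) (ba bb : List Int)
    (hsd : src ≠ dst)
    (hsrc : s.2.get? src = some tsrc) (hdst : s.2.get? dst = some tdst)
    (hbaP : ba ∈ P) (hbbP : bb ∈ P) (hbanebb : ba ≠ bb)
    (hPnd : P.Nodup)
    (hmem : ∀ x, x ∈ ba ∨ x ∈ bb ↔ x ∈ tsrc ∨ x ∈ tdst) :
    UInv V (tsrc.foldl (fun m x => m.insert x dst) s.1,
            (s.2.insert dst (PySem.Set.union tdst tsrc)).erase src)
          (((P.erase ba).erase bb) ++ [ba ++ bb]) := by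
  have hfs : ∀ x, x ∈ tsrc ↔ s.1.get? x = some src := hI.fib src tsrc hsrc
  have hfd : ∀ x, x ∈ tdst ↔ s.1.get? x = some dst := hI.fib dst tdst hdst
  have hg1 : ∀ x, ((tsrc.foldl (fun m x => m.insert x dst) s.1).get? x) =
      if x ∈ tsrc then some dst else s.1.get? x := by
    intro x; exact get?_foldl_insert_fn (fun _ => dst) tsrc s.1 x
  have hg2 : ∀ l, (((s.2.insert dst (PySem.Set.union tdst tsrc)).erase src).get? l) =
      if l = src then none else if l = dst then some (PySem.Set.union tdst tsrc)
      else s.2.get? l := by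
    intro l
    rw [dget_erase]
    by_cases h : l = src
    · simp [h]
    · simp only [if_neg h]
      by_cases h2 : l = dst
      · simp [h2, PySem.Dict.get?_insert_self]
      · simp [h2, PySem.Dict.get?_insert_of_ne _ _ h2]
  have humem : ∀ x : Int, x ∈ PySem.Set.union tdst tsrc ↔ x ∈ tdst ∨ x ∈ tsrc :=
    fun x => PySem.Set.mem_union tdst tsrc x
  have hrest : ∀ blk, blk ∈ (P.erase ba).erase bb ↔ blk ∈ P ∧ blk ≠ ba ∧ blk ≠ bb := by
    intro blk
    rw [List.Nodup.mem_erase_iff (hPnd.erase ba), List.Nodup.mem_erase_iff hPnd]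
    tauto
  have hdisj2 : ∀ b1 ∈ P, ∀ b2 ∈ P, b1 ≠ b2 → ∀ x ∈ b1, x ∉ b2 := by
    intro b1 h1 b2 h2 hne
    exact List.Pairwise.forall (by intro u v h x hx hx'; exact h x hx' hx) hI.disj h1 h2 hne
  have hrestfib : ∀ blk, blk ∈ P → blk ≠ ba → blk ≠ bb → ∀ x ∈ blk,
      s.1.get? x ≠ some src ∧ s.1.get? x ≠ some dst := by
    intro blk hblk hne1 hne2 x hx
    constructor
    · intro hc
      have : x ∈ ba ∨ x ∈ bb := (hmem x).mpr (Or.inl ((hfs x).mpr hc))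
      rcases this with h | h
      · exact hdisj2 blk hblk ba hbaP hne1 x hx h
      · exact hdisj2 blk hblk bb hbbP hne2 x hx h
    · intro hc
      have : x ∈ ba ∨ x ∈ bb := (hmem x).mpr (Or.inr ((hfd x).mpr hc))
      rcases this with h | h
      · exact hdisj2 blk hblk ba hbaP hne1 x hx h
      · exact hdisj2 blk hblk bb hbbP hne2 x hx h
  -- new leader of all merged members is dst
  have hnewdst : ∀ x, ((tsrc.foldl (fun m x => m.insert x dst) s.1).get? x) = some dst ↔
      (x ∈ tsrc ∨ x ∈ tdst) := by
    intro x
    rw [hg1]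
    by_cases h : x ∈ tsrc
    · simp [h]
    · simp only [if_neg h]
      constructor
      · intro hc; exact Or.inr ((hfd x).mpr hc)
      · rintro (hc | hc)
        · exact absurd hc h
        · exact (hfd x).mp hc
  refine ⟨?_, ?_, ?_, ?_, ?_, ?_, ?_, ?_, ?_, ?_⟩
  · exact PySem.Dict.nodup_keys_foldl_insert _ _ _ hI.nd1
  · exact dnodup_keys_erase _ _ (PySem.Dict.nodup_keys_insert _ _ _ hI.nd2)
  · intro x
    rw [hg1]
    by_cases h : x ∈ tsrc
    · simp only [if_pos h, Option.isSome_some]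
      have := (hfs x).mp h
      rw [← hI.dom x, this]
      simp
    · simp only [if_neg h]; exact hI.dom x
  · intro l tr htr x
    rw [hg2] at htr
    rw [hg1]
    by_cases h1 : l = src
    · simp [h1] at htr
    · simp only [if_neg h1] at htr
      by_cases h2 : l = dst
      · subst h2
        obtain rfl : tr = PySem.Set.union tdst tsrc := by simp at htr; exact htr.symm
        rw [humem x]
        by_cases hx : x ∈ tsrc
        · simp [hx]
        · simp only [if_neg hx]
          rw [hfd x]
          tauto
      · simp only [if_neg h2] at htr
        have hfl := hI.fib l tr htr
        by_cases hx : x ∈ tsrc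
        · simp only [if_pos hx]
          have hxs : s.1.get? x = some src := (hfs x).mp hx
          constructor
          · intro hc
            have h3 := (hfl x).mp hc
            rw [hxs] at h3
            exact absurd (Option.some_inj.mp h3) (fun he => h1 he.symm)
          · intro hc
            exact absurd (Option.some_inj.mp hc) (fun he => h2 he.symm)
        · simp only [if_neg hx]; exact hfl x
  · intro x l hx
    rw [hg1] at hx
    rw [hg2]
    by_cases h : x ∈ tsrc
    · simp only [if_pos h, Option.some_inj] at hx
      subst hx
      simp [if_neg (Ne.symm hsd)]
    · simp only [if_neg h] at hx
      have hnotsrc : l ≠ src := by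
        intro hc; subst hc; exact h ((hfs x).mpr hx)
      simp only [if_neg hnotsrc]
      by_cases h2 : l = dst
      · simp [h2]
      · simp only [if_neg h2]; exact hI.ldr x l hx
  · -- sizes
    have hcd : s.2.contains dst = true := (dcontains_iff_isSome _ _).mpr (by rw [hdst]; rfl)
    have h1 : (s.2.insert dst (PySem.Set.union tdst tsrc)).size = s.2.size :=
      dsize_insert_of_contains _ _ _ hcd
    have hnd : (s.2.insert dst (PySem.Set.union tdst tsrc)).keys.Nodup :=
      PySem.Dict.nodup_keys_insert _ _ _ hI.nd2
    have hcs : (s.2.insert dst (PySem.Set.union tdst tsrc)).contains src = true := by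
      rw [dcontains_iff_isSome, PySem.Dict.get?_insert_of_ne _ _ hsd, hsrc]; rfl
    have h2 : ((s.2.insert dst (PySem.Set.union tdst tsrc)).erase src).size
        = (s.2.insert dst (PySem.Set.union tdst tsrc)).size - 1 :=
      dsize_erase_of_contains _ _ hnd hcs
    have hbb' : bb ∈ P.erase ba := (List.Nodup.mem_erase_iff hPnd).mpr ⟨Ne.symm hbanebb, hbbP⟩
    have hlen1 : (P.erase ba).length = P.length - 1 := List.length_erase_of_mem hbaP
    have hlen2 : ((P.erase ba).erase bb).length = (P.erase ba).length - 1 :=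
      List.length_erase_of_mem hbb'
    have hPlen : 1 ≤ (P.erase ba).length := List.length_pos_of_mem hbb'
    have hs2 : 1 ≤ s.2.size := by
      have := hI.siz
      have : 1 ≤ P.length := List.length_pos_of_mem hbaP
      omega
    rw [h2, h1, hI.siz]
    simp only [List.length_append, hlen2, hlen1, List.length_cons, List.length_nil]
    omega
  · intro blk hblk
    rcases List.mem_append.mp hblk with h | h
    · exact hI.nonempty blk ((hrest blk).mp h).1
    · simp only [List.mem_singleton] at h
      subst h
      have := hI.nonempty ba hbaP
      simp [this]
  · rw [List.pairwise_append]
    refine ⟨?_, ?_, ?_⟩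
    · exact (hI.disj.sublist ((List.erase_sublist).trans (List.erase_sublist)))
    · simp
    · intro b1 hb1 b2 hb2 x hx
      simp only [List.mem_singleton] at hb2
      subst hb2
      obtain ⟨hb1P, hne1, hne2⟩ := (hrest b1).mp hb1
      intro hc
      rcases List.mem_append.mp hc with h | h
      · exact hdisj2 b1 hb1P ba hbaP hne1 x hx h
      · exact hdisj2 b1 hb1P bb hbbP hne2 x hx h
  · intro x l hx
    rw [hg1] at hx
    by_cases h : x ∈ tsrc
    · refine ⟨ba ++ bb, by simp, ?_⟩
      rcases (hmem x).mpr (Or.inl h) with h' | h' <;> simp [h']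
    · simp only [if_neg h] at hx
      obtain ⟨blk, hblkP, hxblk⟩ := hI.cover x l hx
      by_cases hb1 : x ∈ ba
      · exact ⟨ba ++ bb, by simp, by simp [hb1]⟩
      by_cases hb2 : x ∈ bb
      · exact ⟨ba ++ bb, by simp, by simp [hb2]⟩
      have hne1 : blk ≠ ba := fun hc => hb1 (hc ▸ hxblk)
      have hne2 : blk ≠ bb := fun hc => hb2 (hc ▸ hxblk)
      exact ⟨blk, List.mem_append.mpr (Or.inl ((hrest blk).mpr ⟨hblkP, hne1, hne2⟩)), hxblk⟩
  · intro blk hblk x hxblk y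
    rcases List.mem_append.mp hblk with h | h
    · obtain ⟨hblkP, hne1, hne2⟩ := (hrest blk).mp h
      have hold := hI.blockfib blk hblkP x hxblk y
      have hx' := hrestfib blk hblkP hne1 hne2 x hxblk
      have hxsrc : x ∉ tsrc := fun hc => hx'.1 ((hfs x).mp hc)
      rw [hold, hg1, hg1, if_neg hxsrc]
      by_cases hy : y ∈ tsrc
      · simp only [if_pos hy]
        have hys : s.1.get? y = some src := (hfs y).mp hy
        constructor
        · intro hc
          rw [hys] at hc
          exact absurd hc.symm hx'.1
        · intro hc
          exact absurd hc.symm hx'.2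
      · simp [hy]
    · simp only [List.mem_singleton] at h
      subst h
      have hxd : ((tsrc.foldl (fun m x => m.insert x dst) s.1).get? x) = some dst :=
        (hnewdst x).mpr ((hmem x).mp (List.mem_append.mp hxblk))
      rw [hxd]
      rw [hnewdst y]
      rw [← hmem y]
      simp

theorem inv_step (V : List Int) (s : UFSt) (P : List (List Int)) (a b : Int)
    (hI : UInv V s P) (ha : a ∈ V) (hb : b ∈ V) :
    UInv V (ufUnion s a b) (mergeB P a b) := by
  obtain ⟨la, hla⟩ := Option.isSome_iff_exists.mp ((hI.dom a).mpr ha)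
  obtain ⟨lb, hlb⟩ := Option.isSome_iff_exists.mp ((hI.dom b).mpr hb)
  have hgda : s.1.getD a 0 = la := by simp [PySem.Dict.getD_eq_get?_getD, hla]
  have hgdb : s.1.getD b 0 = lb := by simp [PySem.Dict.getD_eq_get?_getD, hlb]
  have hfind : ∀ (c : Int) (lc : Int), s.1.get? c = some lc →
      ∃ bc, P.find? (fun blk => blk.contains c) = some bc := by
    intro c lc hlc
    obtain ⟨blk, hblkP, hcblk⟩ := hI.cover c lc hlc
    cases h : P.find? (fun blk => blk.contains c) with
    | some bc => exact ⟨bc, rfl⟩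
    | none =>
      have := List.find?_eq_none.mp h blk hblkP
      simp only [List.contains_iff_mem] at this
      exact absurd hcblk this
  obtain ⟨bb, hfindb⟩ := hfind b lb hlb
  have hbbP : bb ∈ P := List.mem_of_find?_eq_some hfindb
  have hbbb : b ∈ bb := by
    have := List.find?_some hfindb
    simpa [List.contains_iff_mem] using this
  have hiffa : a ∈ bb ↔ s.1.get? a = s.1.get? b := hI.blockfib bb hbbP b hbbb a
  by_cases hll : la = lb
  · have habb : a ∈ bb := hiffa.mpr (by rw [hla, hlb, hll])
    have hgeq : s.1.getD a 0 = s.1.getD b 0 := by rw [hgda, hgdb, hll]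
    simp only [ufUnion, mergeB, hfindb, if_pos hgeq, if_pos habb]
    exact hI
  · have habb : a ∉ bb := by
      intro hc
      have := hiffa.mp hc
      rw [hla, hlb] at this
      exact hll (Option.some_inj.mp this)
    obtain ⟨ba, hfinda⟩ := hfind a la hla
    have hbaP : ba ∈ P := List.mem_of_find?_eq_some hfinda
    have haba : a ∈ ba := by
      have := List.find?_some hfinda
      simpa [List.contains_iff_mem] using this
    have hbanebb : ba ≠ bb := fun hc => habb (hc ▸ haba)
    have hPnd : P.Nodup := by
      refine List.Pairwise.imp_of_mem ?_ hI.disj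
      intro b1 b2 hm1 hm2 hr
      obtain ⟨x, hx⟩ := List.exists_mem_of_ne_nil b1 (hI.nonempty b1 hm1)
      exact fun he => hr x hx (he ▸ hx)
    obtain ⟨ta, hta⟩ := Option.isSome_iff_exists.mp (hI.ldr a la hla)
    obtain ⟨tb, htb⟩ := Option.isSome_iff_exists.mp (hI.ldr b lb hlb)
    have hgdla : s.2.getD la [] = ta := by simp [PySem.Dict.getD_eq_get?_getD, hta]
    have hgdlb : s.2.getD lb [] = tb := by simp [PySem.Dict.getD_eq_get?_getD, htb]
    have hmem : ∀ x, x ∈ ba ∨ x ∈ bb ↔ x ∈ ta ∨ x ∈ tb := by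
      intro x
      have h1 : x ∈ ba ↔ s.1.get? x = some la := by
        rw [hI.blockfib ba hbaP a haba x, hla]
      have h2 : x ∈ bb ↔ s.1.get? x = some lb := by
        rw [hI.blockfib bb hbbP b hbbb x, hlb]
      have h3 := hI.fib la ta hta x
      have h4 := hI.fib lb tb htb x
      rw [h1, h2, ← h3, ← h4]
    have hgne : ¬ (s.1.getD a 0 = s.1.getD b 0) := by
      rw [hgda, hgdb]; exact hll
    simp only [ufUnion, mergeB, hfindb, hfinda, if_neg hgne, if_neg habb, hgda, hgdb, hgdla, hgdlb]
    split_ifs with hlen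
    · exact merged_inv V s P hI la lb ta tb ba bb hll hta htb hbaP hbbP hbanebb hPnd hmem
    · exact merged_inv V s P hI lb la tb ta ba bb (Ne.symm hll) htb hta hbaP hbbP hbanebb hPnd
        (fun x => (hmem x).trans or_comm)

theorem inv_fold (V : List Int) (es : List (Int × Int)) :
    ∀ (s : UFSt) (P : List (List Int)), UInv V s P → (∀ e ∈ es, e.1 ∈ V ∧ e.2 ∈ V) →
    UInv V (es.foldl (fun s e => ufUnion s e.1 e.2) s) (es.foldl (fun P e => mergeB P e.1 e.2) P) := by
  intro s P hI hes
  induction es generalizing s P with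
  | nil => exact hI
  | cons e es ih =>
    simp only [List.foldl_cons]
    exact ih _ _ (inv_step V s P e.1 e.2 hI (hes e (by simp)).1 (hes e (by simp)).2)
      (fun e' he' => hes e' (by simp [he']))

-- ===== VERDICT (by name: the statement is the Claim_ definition above) =====
theorem maskClustering_spec : Claim_equal_maskClustering := by
  unfold Claim_equal_maskClustering
  intro nodeList maxSpacing bitCount _ _
  unfold Spec_maskClustering
  have hlabels : (nodeList.foldl (fun d node => d.insert node ((PySem.Int.ofStrBase? node 2).getD 0)) PySem.Dict.empty) = generateIntegerLabels nodeList := rfl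
  have hmasks : ((PySem.List.pyRange 1 maxSpacing 1).flatMap
      (fun i => PySem.List.combinations (PySem.List.pyRange 0 bitCount 1) i.toNat))
      = calculateMasks bitCount maxSpacing := by
    unfold calculateMasks
    rw [PySem.List.foldl_append_eq_flatMap]
    simp
  set labels := generateIntegerLabels nodeList with hlab
  set masks := calculateMasks bitCount maxSpacing with hm
  set edges : List (Int × Int) := nodeList.flatMap (fun node =>
    (masks.filter (fun m => labels.contains (swapByMask node m))).map
      (fun m => (labels.getD (swapByMask node m) 0, labels.getD node 0))) with hedges
  have hA : maskClustering nodeList maxSpacing bitCount =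
      (((edges.foldl (fun s e => ufUnion s e.1 e.2) (ufInit (labels.items.map (fun p => p.2))))).2.size : Int) := by
    simp only [maskClustering]
    rw [hedges, List.foldl_flatMap]
    rw [← hlab, ← hm]
    have hfun : (fun (s : UFSt) node =>
        List.foldl (fun s mask => if labels.contains (swapByMask node mask) = true
          then ufUnion s (labels.getD (swapByMask node mask) 0) (labels.getD node 0) else s) s masks)
      = (fun (acc : UFSt) x => List.foldl (fun s e => ufUnion s e.1 e.2) acc
          (List.map (fun m => (labels.getD (swapByMask x m) 0, labels.getD x 0))
            (List.filter (fun m => labels.contains (swapByMask x m)) masks))) := by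
      funext s node
      rw [List.foldl_map]
      rw [PySem.List.foldl_if_eq_foldl_filter
        (p := fun mask => labels.contains (swapByMask node mask))
        (f := fun s mask => ufUnion s (labels.getD (swapByMask node mask) 0) (labels.getD node 0))]
    rw [hfun]
  have hB : maskClustering_alt nodeList maxSpacing bitCount =
      (((edges.foldl (fun P e => mergeB P e.1 e.2)
        ((PySem.List.dedup (labels.items.map (fun p => p.2))).map (fun v => [v])))).length : Int) := by
    unfold maskClustering_alt
    rw [hmasks, hlabels]
    rfl
  rw [hA, hB]
  have hkeys : labels.keys = PySem.Set.ofList nodeList := by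
    rw [hlab]
    unfold generateIntegerLabels
    rw [PySem.Dict.keys_foldl_insert (f := fun (d : PySem.Dict String Int) x => ((PySem.Int.ofStrBase? x 2).getD 0))]
    simp [PySem.Set.update_nil_left, PySem.Dict.keys_empty]
  have hvals : labels.values = labels.items.map (fun p => p.2) := rfl
  have hgetDmem : ∀ c : String, labels.contains c = true →
      labels.getD c 0 ∈ PySem.List.dedup (labels.items.map (fun p => p.2)) := by
    intro c hc
    rw [PySem.Dict.contains_eq_isSome_get?] at hc
    obtain ⟨v, hv⟩ := Option.isSome_iff_exists.mp hc
    have hvm : (c, v) ∈ labels.items := PySem.Dict.mem_items_of_get?_eq_some labels hv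
    have : v ∈ labels.items.map (fun p => p.2) := List.mem_map.mpr ⟨(c, v), hvm, rfl⟩
    rw [PySem.Dict.getD_eq_get?_getD, hv]
    simpa [PySem.List.mem_dedup] using this
  have hend : ∀ e ∈ edges, e.1 ∈ PySem.List.dedup (labels.items.map (fun p => p.2)) ∧
      e.2 ∈ PySem.List.dedup (labels.items.map (fun p => p.2)) := by
    intro e he
    rw [hedges] at he
    obtain ⟨node, hnode, hm⟩ := List.mem_flatMap.mp he
    obtain ⟨m, hmf, rfl⟩ := List.mem_map.mp hm
    have hc1 : labels.contains (swapByMask node m) = true := (List.mem_filter.mp hmf).2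
    have hc2 : labels.contains node = true := by
      rw [PySem.Dict.contains_iff_mem_keys, hkeys]
      exact (PySem.Set.mem_ofList _ _).mpr hnode
    exact ⟨hgetDmem _ hc1, hgetDmem _ hc2⟩
  have hfold := inv_fold (PySem.List.dedup (labels.items.map (fun p => p.2))) edges
    (ufInit (labels.items.map (fun p => p.2)))
    ((PySem.List.dedup (labels.items.map (fun p => p.2))).map (fun v => [v]))
    (inv_init _) hend
  exact congrArg (Int.ofNat) hfold.siz
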